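-- pv_equiv track=rewrite | github.com/Outsider-corp/algorithms-structures | dynamic_programming.py | chess_king
-- ===== SOURCE A (Python) =====
-- def chess_king(m: int, n: int):
--     """
--     Шахматный король расположен в ячейке 1, 1. Ему нужно попасть в ячейку m, n. Король имеет право ходить только
--     вниз, вправо и по диагонали вниз вправо. Сколько существует способов это сделать?
--     Рекуррентная задача:
--         count(m, n) = count(m-1,n) + count(m, n-1) + count(m-1, n-1),
--         при этом введём фиктивные столбец и строку 0, 0, заполненные нулями,
--         а также count(1,1) = 1.
--     :param m: int - номер столбца конечной клетки
--     :param n: int - номер строки конечной клетки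
--     :return: int - количество способов.
--     """
--     count = [[0] * (m + 1) for _ in range(n + 1)]
--     count[1][1] = 1
--     for i in range(1, n + 1):
--         for j in range(1, m + 1):
--             if i == j == 1:
--                 continue
--             count[i][j] = count[i - 1][j] + count[i][j - 1] + count[i - 1][j - 1]
--     return count[n][m]
-- ===== SOURCE B (Python) =====
-- def chess_king(m: int, n: int):
--     """Delannoy closed form: D(m-1, n-1) = sum_k C(a,k)*C(b,k)*2^k with a = min(m,n)-1,
--     b = max(m,n)-1, computed with an incrementally updated (exact) term."""
--     a, b = (m - 1, n - 1) if m <= n else (n - 1, m - 1)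
--     total = 0
--     term = 1
--     for k in range(a + 1):
--         total += term
--         term = term * (a - k) * (b - k) * 2 // ((k + 1) * (k + 1))
--     return total
-- ===== Notes on version B (the rewrite author's own statement) =====
-- stated objective: faster
-- what changed: Replaces the (n+1)x(m+1) dynamic-programming table with the Delannoy-number closed form sum_k C(a,k)*C(b,k)*2^k (a=min(m,n)-1, b=max(m,n)-1), computed in one short loop with an exactly-divisible incremental term update.
import Mathlib
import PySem

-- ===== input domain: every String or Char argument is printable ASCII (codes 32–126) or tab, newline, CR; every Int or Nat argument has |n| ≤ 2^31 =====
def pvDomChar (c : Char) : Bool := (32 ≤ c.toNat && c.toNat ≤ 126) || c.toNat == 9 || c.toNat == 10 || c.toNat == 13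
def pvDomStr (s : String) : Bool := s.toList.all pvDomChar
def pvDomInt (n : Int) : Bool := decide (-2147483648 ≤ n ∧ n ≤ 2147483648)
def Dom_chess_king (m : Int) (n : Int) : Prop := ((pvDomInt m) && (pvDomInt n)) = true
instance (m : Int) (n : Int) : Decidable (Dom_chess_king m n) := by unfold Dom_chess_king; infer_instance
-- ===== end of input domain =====

-- B replaces A's O(m*n) DP table by the Delannoy closed form sum_k C(a,k)C(b,k)2^k in a single O(min(m,n)) loop; measured faster.


-- ===== PORT A =====
-- A-side helpers: count[i][j] read / write (all indices used under Pre_ are nonnegative and in range, where these are exact)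
def tget (t : List (List Int)) (i j : Int) : Int :=
  PySem.List.pyGetD (PySem.List.pyGetD t i []) j 0

def tset (t : List (List Int)) (i j v : Int) : List (List Int) :=
  PySem.List.pySetD t i (PySem.List.pySetD (PySem.List.pyGetD t i []) j v)

def chess_king (m : Int) (n : Int) : Int :=
  -- count = [[0] * (m + 1) for _ in range(n + 1)]
  let count0 : List (List Int) :=
    (PySem.List.pyRange 0 (n+1) 1).map (fun _ => PySem.List.pyRepeat [(0 : Int)] (m+1))
  -- count[1][1] = 1
  let count1 := tset count0 1 1 1
  -- for i in range(1, n + 1): for j in range(1, m + 1): …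
  let count2 := (PySem.List.pyRange 1 (n+1) 1).foldl (fun c i =>
      (PySem.List.pyRange 1 (m+1) 1).foldl (fun c j =>
        if i = 1 ∧ j = 1 then c
        else tset c i j (tget c (i-1) j + tget c i (j-1) + tget c (i-1) (j-1))) c) count1
  tget count2 n m

-- ===== PORT B =====
def chess_king_alt (m : Int) (n : Int) : Int :=
  let a := if m ≤ n then m - 1 else n - 1
  let b := if m ≤ n then n - 1 else m - 1
  let s := (PySem.List.pyRange 0 (a+1) 1).foldl
    (fun (s : Int × Int) k =>
      (s.1 + s.2, PySem.Int.floordiv (s.2 * (a - k) * (b - k) * 2) ((k+1) * (k+1))))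
    ((0 : Int), (1 : Int))
  s.1

-- ===== PRECONDITION & SPEC =====
-- A raises IndexError whenever m < 1 or n < 1 (there is no cell [1][1] to initialise or read); exactly those inputs are excluded.
def Pre_chess_king (m : Int) (n : Int) : Prop := 1 ≤ m ∧ 1 ≤ n
instance (m : Int) (n : Int) : Decidable (Pre_chess_king m n) := by unfold Pre_chess_king; infer_instance

def pvWitness_chess_king : Int × Int := (3, 4)

def Spec_chess_king (m : Int) (n : Int) (out : Int) : Prop := out = chess_king_alt m n
instance (m : Int) (n : Int) (out : Int) : Decidable (Spec_chess_king m n out) := by unfold Spec_chess_king; infer_instance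

-- ===== CLAIM (what is proved, stated in full; the proofs are below) =====
def Claim_equal_chess_king : Prop := ∀ (m : Int) (n : Int), Dom_chess_king m n → Pre_chess_king m n → Spec_chess_king m n (chess_king m n)

-- ===== LEMMAS AND PROOFS =====

-- Delannoy numbers by their recurrence (count[i][j] of A is del (i-1) (j-1))
def del : Nat → Nat → Nat
  | 0, _ => 1
  | _+1, 0 => 1
  | a+1, b+1 => del a (b+1) + del (a+1) b + del a b
termination_by a b => a + b

lemma del_zero_left (b : Nat) : del 0 b = 1 := by cases b <;> simp [del]
lemma del_zero_right (a : Nat) : del a 0 = 1 := by cases a <;> simp [del]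

lemma del_comm (a b : Nat) : del a b = del b a := by
  match a, b with
  | 0, b => rw [del_zero_left, del_zero_right]
  | a+1, 0 => rw [del_zero_left, del_zero_right]
  | a+1, b+1 =>
    rw [show del (a+1) (b+1) = del a (b+1) + del (a+1) b + del a b from by simp [del],
        show del (b+1) (a+1) = del b (a+1) + del (b+1) a + del b a from by simp [del],
        del_comm a (b+1), del_comm (a+1) b, del_comm a b]
    omega
termination_by a + b

-- partial sums of the closed form
def dsum (N a b : Nat) : Nat := ∑ k ∈ Finset.range N, a.choose k * b.choose k * 2 ^ k

lemma dsum_trim (N a b : Nat) (h : a < N) : dsum N a b = dsum (a+1) a b := by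
  unfold dsum
  refine (Finset.sum_subset (fun x hx => Finset.mem_range.2 (by have := Finset.mem_range.1 hx; omega)) ?_).symm
  intro k _ hk2
  have hak : a < k := by simpa using hk2
  simp [Nat.choose_eq_zero_of_lt hak]

lemma dsum_rec (a b N : Nat) (h : a + 2 ≤ N) :
    dsum N (a+1) (b+1) = dsum N a (b+1) + dsum N (a+1) b + dsum N a b := by
  obtain ⟨M, rfl⟩ : ∃ M, N = M + 1 := ⟨N - 1, by omega⟩
  have hM : a < M := by omega
  unfold dsum
  rw [Finset.sum_range_succ' (fun k => (a+1).choose k * (b+1).choose k * 2 ^ k),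
      Finset.sum_range_succ' (fun k => a.choose k * (b+1).choose k * 2 ^ k),
      Finset.sum_range_succ' (fun k => (a+1).choose k * b.choose k * 2 ^ k),
      Finset.sum_range_succ' (fun k => a.choose k * b.choose k * 2 ^ k)]
  simp only [Nat.choose_succ_succ']
  have key : ∀ i, (a.choose i + a.choose (i+1)) * ((b.choose i + b.choose (i+1))) * 2 ^ (i+1)
      + 2 * (a.choose (i+1) * b.choose (i+1) * 2 ^ (i+1))
      = a.choose (i+1) * (b.choose i + b.choose (i+1)) * 2 ^ (i+1)
      + (a.choose i + a.choose (i+1)) * b.choose (i+1) * 2 ^ (i+1)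
      + a.choose (i+1) * b.choose (i+1) * 2 ^ (i+1)
      + 2 * (a.choose i * b.choose i * 2 ^ i) := by
    intro i; ring_nf
  have hsum := Finset.sum_congr rfl (fun i (_ : i ∈ Finset.range M) => key i)
  have hD : (∑ i ∈ Finset.range M, a.choose i * b.choose i * 2 ^ i)
      = ∑ i ∈ Finset.range (M+1), a.choose i * b.choose i * 2 ^ i := by
    rw [Finset.sum_range_succ, Nat.choose_eq_zero_of_lt hM]; ring
  have e1 : (∑ i ∈ Finset.range M, 2 * (a.choose (i+1) * b.choose (i+1) * 2 ^ (i+1)))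
      = 2 * ∑ i ∈ Finset.range M, a.choose (i+1) * b.choose (i+1) * 2 ^ (i+1) :=
    (Finset.mul_sum _ _ _).symm
  have e2 : (∑ i ∈ Finset.range M, 2 * (a.choose i * b.choose i * 2 ^ i))
      = 2 * ∑ i ∈ Finset.range M, a.choose i * b.choose i * 2 ^ i :=
    (Finset.mul_sum _ _ _).symm
  simp only [Finset.sum_add_distrib] at hsum
  rw [e1, e2] at hsum
  rw [Finset.sum_range_succ'] at hD
  simp only [Nat.choose_zero_right, pow_zero, mul_one] at *
  omega

lemma dsum_a_zero (N a : Nat) : dsum (N+1) a 0 = 1 := by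
  induction N with
  | zero => simp [dsum]
  | succ M ih =>
    unfold dsum at *
    rw [Finset.sum_range_succ, ih]
    simp

lemma dsum_eq_del (a b : Nat) : dsum (a+1) a b = del a b := by
  match a, b with
  | 0, b => simp [dsum, del_zero_left]
  | a+1, 0 => rw [del_zero_right, dsum_a_zero]
  | a+1, b+1 =>
    have h1 : dsum (a+2) (a+1) (b+1) = dsum (a+b+3) (a+1) (b+1) := by
      rw [dsum_trim (a+b+3) (a+1) (b+1) (by omega)]
    rw [h1, dsum_rec a b (a+b+3) (by omega),
        dsum_trim (a+b+3) a (b+1) (by omega), dsum_trim (a+b+3) (a+1) b (by omega),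
        dsum_trim (a+b+3) a b (by omega),
        dsum_eq_del a (b+1), dsum_eq_del (a+1) b, dsum_eq_del a b]
    simp [del]
termination_by a + b

-- ---- B's loop computes the partial sums with an exactly divisible term update ----

lemma choose_step (A K : Nat) : A.choose K * (A - K) = A.choose (K+1) * (K+1) := by
  rw [← Nat.choose_succ_right_eq]

lemma B_loop (A B : Nat) (K : Nat) (hK : K ≤ A + 1) :
    (PySem.List.pyRange 0 (K : Int) 1).foldl
      (fun (s : Int × Int) k =>
        (s.1 + s.2, PySem.Int.floordiv (s.2 * ((A : Int) - k) * ((B : Int) - k) * 2) ((k+1) * (k+1))))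
      ((0 : Int), (1 : Int))
    = ((dsum K A B : Int), ((2 ^ K * A.choose K * B.choose K : Nat) : Int)) := by
  induction K with
  | zero => simp [PySem.List.pyRange_one_eq_nil, dsum]
  | succ K ih =>
    have hK' : K ≤ A := by omega
    rw [show ((K + 1 : Nat) : Int) = (K : Int) + 1 by push_cast; ring,
        PySem.List.pyRange_one_succ_right (by positivity),
        List.foldl_append, ih (by omega)]
    simp only [List.foldl_cons, List.foldl_nil]
    refine Prod.ext ?_ ?_
    · have : (dsum (K+1) A B : Nat) = dsum K A B + 2 ^ K * A.choose K * B.choose K := by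
        unfold dsum; rw [Finset.sum_range_succ]; ring
      push_cast [this]; ring
    · by_cases hB : K ≤ B
      · have hnum : ((2 ^ K * A.choose K * B.choose K : Nat) : Int) * ((A : Int) - K) * ((B : Int) - K) * 2
            = (((K : Int) + 1) * ((K : Int) + 1)) * ((2 ^ (K+1) * A.choose (K+1) * B.choose (K+1) : Nat) : Int) := by
          have hA' : ((A : Int) - K) = ((A - K : Nat) : Int) := by omega
          have hB' : ((B : Int) - K) = ((B - K : Nat) : Int) := by omega
          rw [hA', hB']
          push_cast
          have h1' : ((A.choose K : Int)) * ((A - K : Nat) : Int) = (A.choose (K+1) : Int) * ((K : Int)+1) := by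
            exact_mod_cast congrArg (Nat.cast : Nat → Int) (choose_step A K)
          have h2' : ((B.choose K : Int)) * ((B - K : Nat) : Int) = (B.choose (K+1) : Int) * ((K : Int)+1) := by
            exact_mod_cast congrArg (Nat.cast : Nat → Int) (choose_step B K)
          push_cast at h1' h2'
          linear_combination ((2:Int)^K * 2 * ((B.choose K : Int) * ((B - K : Nat) : Int))) * h1' + ((2:Int)^K * 2 * (((K:Int)+1) * (A.choose (K+1) : Int))) * h2'
        rw [hnum, PySem.Int.floordiv_eq_ediv_of_pos (by positivity),
            Int.mul_ediv_cancel_left _ (by positivity)]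
      · have hBK : B < K := by omega
        have z1 : B.choose K = 0 := Nat.choose_eq_zero_of_lt hBK
        have z2 : B.choose (K+1) = 0 := Nat.choose_eq_zero_of_lt (by omega)
        simp [z1, z2, PySem.Int.floordiv]

-- ---- A's table: shape and cell lemmas ----

def Shp (m n : Int) (t : List (List Int)) : Prop :=
  t.length = (n+1).toNat ∧ ∀ r ∈ t, r.length = (m+1).toNat

lemma pyGetD_toNat {α : Type} (xs : List α) (i : Int) (d : α) (h : 0 ≤ i) :
    PySem.List.pyGetD xs i d = (xs[i.toNat]?).getD d := by
  have e := PySem.List.pyGetD_natCast xs i.toNat d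
  rw [show ((i.toNat : Nat) : Int) = i from by omega] at e
  rw [e, List.getD]

lemma shp_tset (m n : Int) (t : List (List Int)) (hs : Shp m n t) (i j v : Int)
    (hi : 0 ≤ i) (hi2 : i ≤ n) : Shp m n (tset t i j v) := by
  obtain ⟨h1, h2⟩ := hs
  unfold tset
  rw [PySem.List.pySetD_of_nonneg _ _ hi]
  refine ⟨by simpa using h1, ?_⟩
  intro r hr
  rcases List.mem_or_eq_of_mem_set hr with h | rfl
  · exact h2 r h
  · rw [PySem.List.length_pySetD, pyGetD_toNat _ _ _ hi]
    have hilen : i.toNat < t.length := by omega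
    rw [List.getElem?_eq_getElem hilen]
    simpa using h2 _ (List.getElem_mem hilen)

lemma tget_tset (m n : Int) (t : List (List Int)) (hs : Shp m n t) (i j i' j' v : Int)
    (hi : 0 ≤ i) (hi2 : i ≤ n) (hj : 0 ≤ j) (hj2 : j ≤ m)
    (hi' : 0 ≤ i') (hj' : 0 ≤ j') :
    tget (tset t i j v) i' j' = if i' = i ∧ j' = j then v else tget t i' j' := by
  obtain ⟨h1, h2⟩ := hs
  have hilen : i.toNat < t.length := by omega
  unfold tget tset
  rw [PySem.List.pySetD_of_nonneg _ _ hi, pyGetD_toNat t i _ hi, pyGetD_toNat _ i' _ hi']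
  have hrow : t[i.toNat]? = some t[i.toNat] := List.getElem?_eq_getElem hilen
  have hrlen : t[i.toNat].length = (m+1).toNat := h2 _ (List.getElem_mem hilen)
  have hjlen : j.toNat < t[i.toNat].length := by rw [hrlen]; omega
  by_cases hii : i' = i
  · rw [hii, List.getElem?_set_self hilen]
    simp only [Option.getD_some]
    rw [PySem.List.pySetD_of_nonneg _ _ hj, pyGetD_toNat _ j' _ hj']
    rw [hrow]; simp only [Option.getD_some]
    by_cases hjj : j' = j
    · rw [hjj, List.getElem?_set_self hjlen]
      simp
    · have hne : j.toNat ≠ j'.toNat := by omega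
      rw [List.getElem?_set_ne hne]
      simp only [hjj, and_false, if_false]
      rw [pyGetD_toNat t i _ hi, hrow, pyGetD_toNat _ j' _ hj']
      simp
  · have hne : i.toNat ≠ i'.toNat := by omega
    rw [List.getElem?_set_ne hne]
    simp only [hii, false_and, if_false]
    rw [pyGetD_toNat t i' _ hi']

-- ---- the final content of A's table ----

def G (i j : Int) : Int := if 1 ≤ i ∧ 1 ≤ j then ((del (i-1).toNat (j-1).toNat : Nat) : Int) else 0
def init0 (i j : Int) : Int := if i = 1 ∧ j = 1 then 1 else 0

lemma G_eq (i j : Int) (hi : 1 ≤ i) (hj : 1 ≤ j) :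
    G i j = ((del (i-1).toNat (j-1).toNat : Nat) : Int) := if_pos ⟨hi, hj⟩

lemma G_zero (i j : Int) (h : ¬ (1 ≤ i ∧ 1 ≤ j)) : G i j = 0 := if_neg h

lemma G_one_one : G 1 1 = 1 := by unfold G; simp [del]

lemma G_rec (i j : Int) (hi : 1 ≤ i) (hj : 1 ≤ j) (h : ¬(i = 1 ∧ j = 1)) :
    G i j = G (i-1) j + G i (j-1) + G (i-1) (j-1) := by
  by_cases hi1 : i = 1
  · have hj2 : 2 ≤ j := by omega
    rw [hi1]
    rw [G_eq 1 j (by omega) (by omega), G_eq 1 (j-1) (by omega) (by omega),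
        G_zero (1-1) j (by omega), G_zero (1-1) (j-1) (by omega)]
    simp [del_zero_left]
  · by_cases hj1 : j = 1
    · have hi2 : 2 ≤ i := by omega
      rw [hj1]
      rw [G_eq i 1 (by omega) (by omega), G_eq (i-1) 1 (by omega) (by omega),
          G_zero i (1-1) (by omega), G_zero (i-1) (1-1) (by omega)]
      simp [del_zero_right]
    · obtain ⟨a, ha⟩ : ∃ a : Nat, i = (a : Int) + 2 := ⟨(i-2).toNat, by omega⟩
      obtain ⟨b, hb⟩ : ∃ b : Nat, j = (b : Int) + 2 := ⟨(j-2).toNat, by omega⟩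
      subst ha hb
      rw [G_eq _ _ (by omega) (by omega), G_eq _ _ (by omega) (by omega),
          G_eq _ _ (by omega) (by omega), G_eq _ _ (by omega) (by omega)]
      rw [show ((a:Int) + 2 - 1).toNat = a + 1 from by omega,
          show ((b:Int) + 2 - 1).toNat = b + 1 from by omega,
          show ((a:Int) + 2 - 1 - 1).toNat = a from by omega,
          show ((b:Int) + 2 - 1 - 1).toNat = b from by omega]
      rw [show del (a+1) (b+1) = del a (b+1) + del (a+1) b + del a b from by simp [del]]
      push_cast; ring

-- the loop body of A's inner for-loop
def stepA (i : Int) (c : List (List Int)) (j : Int) : List (List Int) :=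
  if i = 1 ∧ j = 1 then c
  else tset c i j (tget c (i-1) j + tget c i (j-1) + tget c (i-1) (j-1))

lemma inner_fold (m n kk : Int) (hk : 0 ≤ kk) (hk2 : kk < n)
    (t : List (List Int)) (hs : Shp m n t)
    (hinv : ∀ i j : Int, 0 ≤ i → i ≤ n → 0 ≤ j → j ≤ m →
      tget t i j = if i ≤ kk then G i j else init0 i j)
    (J : Nat) (hJ : (J : Int) ≤ m) :
    Shp m n ((PySem.List.pyRange 1 ((J:Int)+1) 1).foldl (stepA (kk+1)) t) ∧
    ∀ i j : Int, 0 ≤ i → i ≤ n → 0 ≤ j → j ≤ m →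
      tget ((PySem.List.pyRange 1 ((J:Int)+1) 1).foldl (stepA (kk+1)) t) i j =
        if i ≤ kk then G i j else if i = kk+1 ∧ j ≤ (J:Int) then G i j else init0 i j := by
  induction J with
  | zero =>
    rw [show (((0:Nat):Int)) = (0:Int) from rfl, PySem.List.pyRange_one_eq_nil (by omega),
        List.foldl_nil]
    refine ⟨hs, fun i j hi hi2 hj hj2 => ?_⟩
    rw [hinv i j hi hi2 hj hj2]
    split_ifs with h1 h2
    · rfl
    · have hj0 : j = 0 := by omega
      rw [hj0, G_zero _ _ (by omega)]
      unfold init0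
      rw [if_neg (by omega)]
    · rfl
  | succ J ih =>
    have hJ' : (J : Int) ≤ m := by push_cast at hJ ⊢; omega
    obtain ⟨hsJ, hvJ⟩ := ih hJ'
    rw [show (((J+1:Nat)):Int) = (J:Int)+1 from by push_cast; ring,
        PySem.List.pyRange_one_succ_right (by omega), List.foldl_append,
        List.foldl_cons, List.foldl_nil]
    set t' := (PySem.List.pyRange 1 ((J:Int)+1) 1).foldl (stepA (kk+1)) t with ht'
    unfold stepA
    by_cases hskip : kk + 1 = 1 ∧ (J:Int) + 1 = 1
    · rw [if_pos hskip]
      refine ⟨hsJ, fun i j hi hi2 hj hj2 => ?_⟩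
      rw [hvJ i j hi hi2 hj hj2]
      have hkk0 : kk = 0 := by omega
      have hJ0 : (J:Int) = 0 := by omega
      rw [hkk0, hJ0] at *
      split_ifs with h1 h2 h3 <;> try rfl
      · omega
      · have : i = 1 ∧ j = 1 := by omega
        rw [this.1, this.2, G_one_one]
        unfold init0
        rw [if_pos ⟨rfl, rfl⟩]
    · rw [if_neg hskip]
      have r1 : tget t' (kk+1-1) ((J:Int)+1) = G kk ((J:Int)+1) := by
        rw [show kk+1-1 = kk from by ring, hvJ kk ((J:Int)+1) (by omega) (by omega) (by omega) (by omega),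
            if_pos (le_refl kk)]
      have r2 : tget t' (kk+1) ((J:Int)+1-1) = G (kk+1) (J:Int) := by
        rw [show (J:Int)+1-1 = (J:Int) from by ring,
            hvJ (kk+1) (J:Int) (by omega) (by omega) (by omega) (by omega),
            if_neg (by omega), if_pos ⟨rfl, le_refl _⟩]
      have r3 : tget t' (kk+1-1) ((J:Int)+1-1) = G kk (J:Int) := by
        rw [show kk+1-1 = kk from by ring, show (J:Int)+1-1 = (J:Int) from by ring,
            hvJ kk (J:Int) (by omega) (by omega) (by omega) (by omega), if_pos (le_refl kk)]
      have hv : tget t' (kk+1-1) ((J:Int)+1) + tget t' (kk+1) ((J:Int)+1-1)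
          + tget t' (kk+1-1) ((J:Int)+1-1) = G (kk+1) ((J:Int)+1) := by
        rw [r1, r2, r3, G_rec (kk+1) ((J:Int)+1) (by omega) (by omega) hskip,
            show kk+1-1 = kk from by ring, show (J:Int)+1-1 = (J:Int) from by ring]
      rw [hv]
      refine ⟨shp_tset m n t' hsJ _ _ _ (by omega) (by omega), fun i j hi hi2 hj hj2 => ?_⟩
      rw [tget_tset m n t' hsJ (kk+1) ((J:Int)+1) i j _ (by omega) (by omega) (by omega)
            (by omega) hi hj]
      by_cases heq : i = kk+1 ∧ j = (J:Int)+1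
      · rw [if_pos heq, heq.1, heq.2]
        rw [if_neg (by omega), if_pos ⟨rfl, le_refl _⟩]
      · rw [if_neg heq, hvJ i j hi hi2 hj hj2]
        split_ifs <;> first | rfl | omega

lemma outer_fold (m n : Int) (hm : 1 ≤ m)
    (t : List (List Int)) (hs : Shp m n t)
    (hinit : ∀ i j : Int, 0 ≤ i → i ≤ n → 0 ≤ j → j ≤ m → tget t i j = init0 i j)
    (K : Nat) (hK : (K : Int) ≤ n) :
    Shp m n ((PySem.List.pyRange 1 ((K:Int)+1) 1).foldl
        (fun c i => (PySem.List.pyRange 1 (m+1) 1).foldl (stepA i) c) t) ∧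
    ∀ i j : Int, 0 ≤ i → i ≤ n → 0 ≤ j → j ≤ m →
      tget ((PySem.List.pyRange 1 ((K:Int)+1) 1).foldl
        (fun c i => (PySem.List.pyRange 1 (m+1) 1).foldl (stepA i) c) t) i j =
        if i ≤ (K:Int) then G i j else init0 i j := by
  induction K with
  | zero =>
    rw [show (((0:Nat):Int)) = (0:Int) from rfl,
        PySem.List.pyRange_one_eq_nil (a := 1) (b := (0:Int)+1) (by omega), List.foldl_nil]
    refine ⟨hs, fun i j hi hi2 hj hj2 => ?_⟩
    rw [hinit i j hi hi2 hj hj2]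
    split_ifs with h1
    · have : i = 0 := by omega
      rw [this, G_zero _ _ (by omega)]
      unfold init0
      rw [if_neg (by omega)]
    · rfl
  | succ K ih =>
    have hK' : (K : Int) ≤ n := by push_cast at hK ⊢; omega
    obtain ⟨hsK, hvK⟩ := ih hK'
    rw [show (((K+1:Nat)):Int) = (K:Int)+1 from by push_cast; ring,
        PySem.List.pyRange_one_succ_right (a := 1) (b := (K:Int)+1) (by omega), List.foldl_append,
        List.foldl_cons, List.foldl_nil]
    have hmn : ((m.toNat : Int)) = m := by omega
    obtain ⟨hs', hv'⟩ := inner_fold m n (K:Int) (by omega) (by omega) _ hsK hvK m.toNat (by omega)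
    rw [hmn] at hs' hv'
    refine ⟨hs', fun i j hi hi2 hj hj2 => ?_⟩
    rw [hv' i j hi hi2 hj hj2]
    split_ifs <;> first | rfl | omega

lemma chess_king_eq (m n : Int) (hm : 1 ≤ m) (hn : 1 ≤ n) :
    chess_king m n = ((del (n-1).toNat (m-1).toNat : Nat) : Int) := by
  have hshape0 : Shp m n ((PySem.List.pyRange 0 (n+1) 1).map
      (fun _ => PySem.List.pyRepeat [(0 : Int)] (m+1))) := by
    constructor
    · rw [List.length_map, PySem.List.length_pyRange_one]
      omega
    · intro r hr
      obtain ⟨x, _, rfl⟩ := List.mem_map.mp hr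
      rw [PySem.List.pyRepeat_singleton, List.length_replicate]
  have hval0 : ∀ i j : Int, 0 ≤ i → i ≤ n → 0 ≤ j → j ≤ m →
      tget ((PySem.List.pyRange 0 (n+1) 1).map
        (fun _ => PySem.List.pyRepeat [(0 : Int)] (m+1))) i j = 0 := by
    intro i j hi hi2 hj hj2
    unfold tget
    rw [PySem.List.pyGetD_map_pyRange_of_nonneg _ _ _ _ hi (by omega),
        PySem.List.pyRepeat_singleton, pyGetD_toNat _ _ _ hj,
        List.getElem?_replicate]
    rw [if_pos (by omega)]
    rfl
  have hs1 : Shp m n (tset ((PySem.List.pyRange 0 (n+1) 1).map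
      (fun _ => PySem.List.pyRepeat [(0 : Int)] (m+1))) 1 1 1) :=
    shp_tset m n _ hshape0 1 1 1 (by omega) (by omega)
  have hv1 : ∀ i j : Int, 0 ≤ i → i ≤ n → 0 ≤ j → j ≤ m →
      tget (tset ((PySem.List.pyRange 0 (n+1) 1).map
        (fun _ => PySem.List.pyRepeat [(0 : Int)] (m+1))) 1 1 1) i j = init0 i j := by
    intro i j hi hi2 hj hj2
    rw [tget_tset m n _ hshape0 1 1 i j 1 (by omega) (by omega) (by omega) (by omega) hi hj]
    unfold init0
    split_ifs with h1
    · rfl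
    · exact hval0 i j hi hi2 hj hj2
  have hncast : ((n.toNat : Nat) : Int) = n := by omega
  obtain ⟨_, hvfin⟩ := outer_fold m n hm _ hs1 hv1 n.toNat (by omega)
  have hfin := hvfin n m (by omega) (by omega) (by omega) (by omega)
  rw [hncast, if_pos (le_refl n), G_eq n m (by omega) (by omega)] at hfin
  exact hfin

lemma alt_eq (m n : Int) (hm : 1 ≤ m) (hn : 1 ≤ n) :
    chess_king_alt m n = ((del (n-1).toNat (m-1).toNat : Nat) : Int) := by
  by_cases hmn : m ≤ n
  · simp only [chess_king_alt, if_pos hmn]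
    have e1 : m - 1 = (((m-1).toNat : Nat) : Int) := by omega
    have e2 : n - 1 = (((n-1).toNat : Nat) : Int) := by omega
    have e3 : m - 1 + 1 = ((m.toNat : Nat) : Int) := by omega
    rw [e3]
    conv_lhs => rw [e1, e2]
    rw [B_loop (m-1).toNat (n-1).toNat m.toNat (by omega)]
    rw [show m.toNat = (m-1).toNat + 1 from by omega, dsum_eq_del,
        del_comm (m-1).toNat (n-1).toNat]
  · simp only [chess_king_alt, if_neg hmn]
    have e1 : n - 1 = (((n-1).toNat : Nat) : Int) := by omega
    have e2 : m - 1 = (((m-1).toNat : Nat) : Int) := by omega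
    have e3 : n - 1 + 1 = ((n.toNat : Nat) : Int) := by omega
    rw [e3]
    conv_lhs => rw [e1, e2]
    rw [B_loop (n-1).toNat (m-1).toNat n.toNat (by omega)]
    rw [show n.toNat = (n-1).toNat + 1 from by omega, dsum_eq_del]

-- ===== VERDICT (by name: the statement is the Claim_ definition above) =====
theorem chess_king_spec : Claim_equal_chess_king := by
  intro m n _ hpre
  obtain ⟨hm, hn⟩ := hpre
  show chess_king m n = chess_king_alt m n
  rw [chess_king_eq m n hm hn, alt_eq m n hm hn]
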